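-- pv_equiv track=rewrite | github.com/pypi-data/pypi-mirror-369 | packages/indo-normalizer/indo_normalizer-1.2.0-py3-none-any.whl/indo_normalizer/functions.py | normalize_leet
-- ===== SOURCE A (Python) =====
-- LEET_MAP = {
--     "!": ["i", "l"],
--     "1": ["i", "l"],
--     "@": ["a"],
--     "4": ["A"], # Dipertahankan sebagai 'A' besar
--     "2": ["z"],
--     "3": ["E"], # Dipertahankan sebagai 'E' besar
--     "$": ["s"],
--     "5": ["s"],
--     "6": ["G"], # Dipertahankan sebagai 'G' besar
--     "7": ["j", "T"], # Dipertahankan sebagai 'T' besar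
--     "8": ["B"], # Dipertahankan sebagai 'B' besar
--     "9": ["g"],
--     "0": ["o", "O"] # Dipertahankan sebagai 'o' dan 'O'
-- }
--
-- def normalize_leet(word, common_words):
--     # Jika kata sudah murni alfabet, kembalikan seperti aslinya (tidak diubah case-nya)
--     if word.isalpha():
--         return word
--
--     has_trailing_2 = word.endswith("2")
--     core_word = word[:-1] if has_trailing_2 else word
--
--     results = set() # Untuk menyimpan hasil yang ditemukan, dengan case yang sudah terbentuk
--
--     def backtrack(index, path):
--         if index == len(core_word):
--             candidate = ''.join(path)
--             # Lakukan pemeriksaan case-insensitive terhadap common_words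
--             if candidate.lower() in common_words:
--                 results.add(candidate)
--             return
--
--         char = core_word[index]
--         # Periksa apakah karakter saat ini adalah kunci di LEET_MAP (pencarian kunci peka kasus)
--         if char in LEET_MAP:
--             for sub in LEET_MAP[char]:
--                 # Gunakan substitusi dari LEET_MAP persis seperti adanya (termasuk case-nya)
--                 path.append(sub)
--                 backtrack(index + 1, path)
--                 path.pop()
--         else:
--             # Jika bukan kunci LEET_MAP, pertahankan karakter aslinya (dengan case aslinya)
--             path.append(char)
--             backtrack(index + 1, path)
--             path.pop()
--
--     backtrack(0, [])
--
--     if not results: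
--         return word
--
--     # Pilih hasil terbaik: yang terpendek, lalu secara alfabetis (untuk konsistensi)
--     best = sorted(list(results), key=lambda w: (len(w), w))[0]
--     return f"{best}-{best}" if has_trailing_2 else best
-- ===== SOURCE B (Python) =====
-- LEET_MAP = {
--     "!": ["i", "l"],
--     "1": ["i", "l"],
--     "@": ["a"],
--     "4": ["A"],
--     "2": ["z"],
--     "3": ["E"],
--     "$": ["s"],
--     "5": ["s"],
--     "6": ["G"],
--     "7": ["j", "T"],
--     "8": ["B"],
--     "9": ["g"],
--     "0": ["o", "O"]
-- }
--
-- def normalize_leet(word, common_words):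
--     if word.isalpha():
--         return word
--
--     has_trailing_2 = word.endswith("2")
--     core_word = word[:-1] if has_trailing_2 else word
--
--     # Hash set of every prefix of every common word: a partial candidate whose
--     # lowercase form is not in it can never extend to a common word.
--     prefixes = set()
--     for w in common_words:
--         for i in range(len(w) + 1):
--             prefixes.add(w[:i])
--     word_set = set(common_words)
--
--     # Breadth-first, level-per-character expansion of the candidate list,
--     # pruning dead prefixes at every level (instead of a recursive backtrack).
--     cands = [""]
--     for ch in core_word:
--         subs = LEET_MAP.get(ch, [ch])
--         cands = [p + s for p in cands for s in subs if (p + s).lower() in prefixes]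
--
--     matches = [c for c in cands if c.lower() in word_set]
--     if not matches:
--         return word
--
--     best = min(matches, key=lambda w: (len(w), w))
--     return f"{best}-{best}" if has_trailing_2 else best
-- ===== Notes on version B (the rewrite author's own statement) =====
-- stated objective: alternative
-- what changed: B replaces A's recursive backtracking over a shared path plus a final sort by (len, word) with an iterative breadth-first expansion: a candidate LIST rebuilt level-by-level per character (pruned by a precomputed hash set of all prefixes of the common words), a filter against a set of the common words, and a single min(key=(len, w)) pass instead of sorting.
import Mathlib
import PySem

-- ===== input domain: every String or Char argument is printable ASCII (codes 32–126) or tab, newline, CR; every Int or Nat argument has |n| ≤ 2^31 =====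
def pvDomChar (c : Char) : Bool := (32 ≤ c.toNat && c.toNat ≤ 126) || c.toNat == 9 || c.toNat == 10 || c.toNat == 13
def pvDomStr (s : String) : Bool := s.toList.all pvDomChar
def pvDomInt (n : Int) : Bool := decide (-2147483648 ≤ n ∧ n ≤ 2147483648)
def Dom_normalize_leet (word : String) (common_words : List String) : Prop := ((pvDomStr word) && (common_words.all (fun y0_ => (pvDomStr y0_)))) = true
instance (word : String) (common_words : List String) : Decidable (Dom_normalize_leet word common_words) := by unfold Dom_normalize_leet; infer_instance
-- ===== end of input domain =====

-- B replaces A's recursive backtracking + final sort by an iterative level-per-character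
-- expansion of a candidate list (pruned by a set of all prefixes of the common words) and one
-- min(key=(len, w)) pass; same return value everywhere.

-- ===== PORT A =====
-- LEET_MAP: values are lists of single-character strings, modelled as lists of chars
-- (''.join of single-char strings = String.ofList of the chars, exact).
def leetMap : PySem.Dict Char (List Char) :=
  PySem.Dict.mk
    [('!', ['i', 'l']), ('1', ['i', 'l']), ('@', ['a']), ('4', ['A']), ('2', ['z']),
     ('3', ['E']), ('$', ['s']), ('5', ['s']), ('6', ['G']), ('7', ['j', 'T']),
     ('8', ['B']), ('9', ['g']), ('0', ['o', 'O'])]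

-- A's backtrack(index, path): recursion over the remaining chars of core_word; `path` is the
-- prefix built so far, `res` the `results` set.
def btA (common : List String) (cw : List Char) (path : List Char) (res : PySem.Set String) :
    PySem.Set String :=
  match cw with
  | [] =>
      if PySem.Str.lower (String.ofList path) ∈ common then
        PySem.Set.add res (String.ofList path)
      else res
  | c :: rest =>
      match PySem.Dict.get? leetMap c with
      | some subs => subs.foldl (fun r s => btA common rest (path ++ [s]) r) res
      | none => btA common rest (path ++ [c]) res

def normalize_leet (word : String) (common_words : List String) : String :=
  if PySem.Str.strIsalpha word then word
  else
    let has2 := PySem.Str.endswith word "2"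
    let core := if has2 then PySem.Str.slice word none (some (-1)) else word
    let results := btA common_words core.toList [] PySem.Set.empty
    if results = [] then word
    else
      match PySem.List.sorted2 results (fun w => PySem.Str.len w) (fun w => w) false with
      | [] => word  -- unreachable: guarded by `if not results`
      | best :: _ => if has2 then best ++ "-" ++ best else best

-- ===== PORT B =====
-- LEET_MAP.get(ch, [ch])
def subsOf (c : Char) : List Char :=
  match PySem.Dict.get? leetMap c with
  | some l => l
  | none => [c]

-- {w[:i] for w in common_words for i in range(len(w)+1)} (candidate strings handled as char lists)
def buildPrefixes (common : List String) : PySem.Set (List Char) :=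
  common.foldl
    (fun acc w =>
      (PySem.List.pyRange 0 (PySem.Str.len w + 1) 1).foldl
        (fun acc2 i => PySem.Set.add acc2 (PySem.List.slice w.toList none (some i))) acc)
    PySem.Set.empty

-- one loop iteration: cands = [p + s for p in cands for s in subs if (p + s).lower() in prefixes]
def stepExpand (P : PySem.Set (List Char)) (cands : List (List Char)) (c : Char) :
    List (List Char) :=
  cands.flatMap (fun p =>
    ((subsOf c).map (fun s => p ++ [s])).filter (fun q => PySem.Chars.lower q ∈ P))

def normalize_leet_alt (word : String) (common_words : List String) : String :=
  if PySem.Str.strIsalpha word then word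
  else
    let has2 := PySem.Str.endswith word "2"
    let core := if has2 then PySem.Str.slice word none (some (-1)) else word
    let P := buildPrefixes common_words
    let wordSet := PySem.Set.ofList common_words
    let cands := core.toList.foldl (stepExpand P) [[]]
    let matchesL := cands.filter (fun p => String.ofList (PySem.Chars.lower p) ∈ wordSet)
    if matchesL = [] then word
    else
      match PySem.List.min2? matchesL (fun p => (p.length : Int)) (fun p => String.ofList p) with
      | none => word  -- unreachable: min2? of a nonempty list
      | some best =>
          if has2 then String.ofList best ++ "-" ++ String.ofList best else String.ofList best

-- ===== PRECONDITION & SPEC =====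
def Spec_normalize_leet (word : String) (common_words : List String) (out : String) : Prop := out = normalize_leet_alt word common_words
instance (word : String) (common_words : List String) (out : String) : Decidable (Spec_normalize_leet word common_words out) := by unfold Spec_normalize_leet; infer_instance

-- ===== CLAIM (what is proved, stated in full; the proofs are below) =====
def Claim_equal_normalize_leet : Prop := ∀ (word : String) (common_words : List String), Dom_normalize_leet word common_words → Spec_normalize_leet word common_words (normalize_leet word common_words)

-- ===== LEMMAS AND PROOFS =====

-- all full substitution expansions of a char list (proof-side notion shared by both analyses)
def allExp : List Char → List (List Char)
  | [] => [[]]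
  | c :: r => (subsOf c).flatMap (fun s => (allExp r).map (fun e => s :: e))

theorem lower_ofList_toList (path : List Char) :
    (PySem.Str.lower (String.ofList path)).toList = PySem.Chars.lower path := by
  simp

theorem lower_ofList (path : List Char) :
    PySem.Str.lower (String.ofList path) = String.ofList (PySem.Chars.lower path) := by
  apply String.toList_inj.mp
  simp

theorem chars_lower_append (a b : List Char) :
    PySem.Chars.lower (a ++ b) = PySem.Chars.lower a ++ PySem.Chars.lower b := by
  simp [PySem.Chars.lower]

theorem mem_allExp_cons (c : Char) (r : List Char) (x : List Char) :
    x ∈ allExp (c :: r) ↔ ∃ s ∈ subsOf c, ∃ e ∈ allExp r, x = s :: e := by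
  simp [allExp]
  tauto

-- membership in A's backtrack result
theorem mem_btA (common : List String) (cw path : List Char) (res : PySem.Set String)
    (x : String) :
    x ∈ btA common cw path res ↔
      x ∈ res ∨ ∃ e ∈ allExp cw, x = String.ofList (path ++ e) ∧ PySem.Str.lower x ∈ common := by
  induction cw generalizing path res with
  | nil =>
      rw [btA]
      by_cases h : PySem.Str.lower (String.ofList path) ∈ common
      · rw [if_pos h, PySem.Set.mem_add]
        constructor
        · rintro (hr | rfl)
          · exact Or.inl hr
          · exact Or.inr ⟨[], by simp [allExp], by simp, h⟩
        · rintro (hr | ⟨e, he, rfl, hc⟩)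
          · exact Or.inl hr
          · simp [allExp] at he; subst he; simp
      · rw [if_neg h]
        constructor
        · exact Or.inl
        · rintro (hr | ⟨e, he, rfl, hc⟩)
          · exact hr
          · simp [allExp] at he; subst he; simp at hc; exact absurd hc h
  | cons c rest ih =>
      rw [btA]
      have main : ∀ (subs : List Char) (res : PySem.Set String),
          (x ∈ subs.foldl (fun r s => btA common rest (path ++ [s]) r) res ↔
            x ∈ res ∨ ∃ s ∈ subs, ∃ e ∈ allExp rest,
              x = String.ofList (path ++ s :: e) ∧ PySem.Str.lower x ∈ common) := by
        intro subs
        induction subs with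
        | nil => intro res; simp
        | cons s ss ihs =>
            intro res
            rw [List.foldl_cons]
            rw [ihs _, ih]
            constructor
            · rintro (⟨hr | ⟨e, he, rfl, hc⟩⟩ | ⟨s', hs', e, he, rfl, hc⟩)
              · exact Or.inl hr
              · exact Or.inr ⟨s, by simp, e, he, by simp, hc⟩
              · exact Or.inr ⟨s', by simp [hs'], e, he, rfl, hc⟩
            · rintro (hr | ⟨s', hs', e, he, rfl, hc⟩)
              · exact Or.inl (Or.inl hr)
              · rcases List.mem_cons.mp hs' with rfl | hs'
                · exact Or.inl (Or.inr ⟨e, he, by simp, hc⟩)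
                · exact Or.inr ⟨s', hs', e, he, rfl, hc⟩
      cases hget : PySem.Dict.get? leetMap c with
      | some subs =>
          rw [main subs res]
          constructor
          · rintro (hr | ⟨s, hs, e, he, rfl, hc⟩)
            · exact Or.inl hr
            · exact Or.inr ⟨s :: e,
                (mem_allExp_cons c rest _).mpr ⟨s, by simp [subsOf, hget, hs], e, he, rfl⟩,
                by simp, hc⟩
          · rintro (hr | ⟨e, he, rfl, hc⟩)
            · exact Or.inl hr
            · rcases (mem_allExp_cons c rest e).mp he with ⟨s, hs, e', he', rfl⟩
              exact Or.inr ⟨s, by simpa [subsOf, hget] using hs, e', he', by simp, hc⟩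
      | none =>
          rw [ih]
          constructor
          · rintro (hr | ⟨e, he, rfl, hc⟩)
            · exact Or.inl hr
            · exact Or.inr ⟨c :: e,
                (mem_allExp_cons c rest _).mpr ⟨c, by simp [subsOf, hget], e, he, rfl⟩,
                by simp, hc⟩
          · rintro (hr | ⟨e, he, rfl, hc⟩)
            · exact Or.inl hr
            · rcases (mem_allExp_cons c rest e).mp he with ⟨s, hs, e', he', rfl⟩
              simp [subsOf, hget] at hs
              subst hs
              exact Or.inr ⟨e', he', by simp, hc⟩

-- the prefix set: exactly the prefixes of the common words
theorem mem_buildPrefixes (common : List String) (s : List Char) :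
    s ∈ buildPrefixes common ↔ ∃ w ∈ common, s <+: w.toList := by
  unfold buildPrefixes
  suffices H : ∀ (acc : PySem.Set (List Char)),
      s ∈ common.foldl
        (fun acc w =>
          (PySem.List.pyRange 0 (PySem.Str.len w + 1) 1).foldl
            (fun acc2 i => PySem.Set.add acc2 (PySem.List.slice w.toList none (some i))) acc)
        acc ↔ s ∈ acc ∨ ∃ w ∈ common, s <+: w.toList by
    rw [H]
    simp [PySem.Set.empty]
  intro acc
  induction common generalizing acc with
  | nil => simp
  | cons w ws ih =>
      simp only [List.foldl_cons]
      rw [ih]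
      have hinner : ∀ (a : PySem.Set (List Char)),
          s ∈ (PySem.List.pyRange 0 (PySem.Str.len w + 1) 1).foldl
              (fun acc2 i => PySem.Set.add acc2 (PySem.List.slice w.toList none (some i))) a ↔
            s ∈ a ∨ s <+: w.toList := by
        intro a
        have : (PySem.List.pyRange 0 (PySem.Str.len w + 1) 1).foldl
            (fun acc2 i => PySem.Set.add acc2 (PySem.List.slice w.toList none (some i))) a =
            PySem.Set.update a
              ((PySem.List.pyRange 0 (PySem.Str.len w + 1) 1).map
                (fun i => PySem.List.slice w.toList none (some i))) := by
          rw [PySem.Set.update, List.foldl_map]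
        rw [this, PySem.Set.mem_update]
        constructor
        · rintro (ha | hm)
          · exact Or.inl ha
          · right
            rcases List.mem_map.mp hm with ⟨i, hi, rfl⟩
            rcases (PySem.List.mem_pyRange_one).mp hi with ⟨h0, hlt⟩
            rw [PySem.List.slice_to w.toList h0]
            exact List.take_prefix _ _
        · rintro (ha | hpre)
          · exact Or.inl ha
          · right
            refine List.mem_map.mpr ⟨(s.length : Int), ?_, ?_⟩
            · refine (PySem.List.mem_pyRange_one).mpr ⟨Int.natCast_nonneg _, ?_⟩
              have hlen : s.length ≤ w.toList.length := hpre.length_le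
              have : PySem.Str.len w = (w.toList.length : Int) := by
                simp [PySem.Str.len_eq]
              omega
            · rw [PySem.List.slice_to w.toList (Int.natCast_nonneg _)]
              simp
              exact (List.prefix_iff_eq_take.mp hpre).symm
      rw [hinner acc]
      simp only [List.exists_mem_cons_iff]
      tauto

-- soundness of the pruned expansion: every candidate is a full expansion
theorem foldl_step_sound (P : PySem.Set (List Char)) (cw : List Char)
    (cands : List (List Char)) (x : List Char)
    (hx : x ∈ cw.foldl (stepExpand P) cands) :
    ∃ p ∈ cands, ∃ e ∈ allExp cw, x = p ++ e := by
  induction cw generalizing cands with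
  | nil => exact ⟨x, by simpa using hx, [], by simp [allExp], by simp⟩
  | cons c rest ih =>
      rw [List.foldl_cons] at hx
      rcases ih _ hx with ⟨p', hp', e', he', rfl⟩
      unfold stepExpand at hp'
      simp only [List.mem_flatMap, List.mem_filter, List.mem_map] at hp'
      rcases hp' with ⟨p, hp, ⟨s, hs, rfl⟩, _⟩
      exact ⟨p, hp, s :: e',
        (mem_allExp_cons c rest _).mpr ⟨s, hs, e', he', rfl⟩, by simp⟩

-- completeness: an expansion whose lowercase is a prefix of a common word survives the prune
theorem foldl_step_complete (common : List String) (cw : List Char)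
    (p : List Char) (cands : List (List Char)) (hp : p ∈ cands) (e : List Char)
    (he : e ∈ allExp cw)
    (hw : ∃ w ∈ common, PySem.Chars.lower (p ++ e) <+: w.toList) :
    p ++ e ∈ cw.foldl (stepExpand (buildPrefixes common)) cands := by
  induction cw generalizing p cands e with
  | nil =>
      simp [allExp] at he
      subst he
      simpa using hp
  | cons c rest ih =>
      rcases (mem_allExp_cons c rest e).mp he with ⟨s, hs, e', he', rfl⟩
      rw [List.foldl_cons]
      have hq : p ++ [s] ∈ stepExpand (buildPrefixes common) cands c := by
        unfold stepExpand
        simp only [List.mem_flatMap, List.mem_filter, List.mem_map]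
        refine ⟨p, hp, ⟨s, hs, rfl⟩, ?_⟩
        simp only [decide_eq_true_eq]
        rcases hw with ⟨w, hwmem, hpre⟩
        refine (mem_buildPrefixes common _).mpr ⟨w, hwmem, ?_⟩
        refine List.IsPrefix.trans ?_ hpre
        have h2 : p ++ s :: e' = (p ++ [s]) ++ e' := by simp
        rw [h2, chars_lower_append (p ++ [s]) e']
        exact List.prefix_append _ _
      have := ih (p ++ [s]) _ hq e' he' (by simpa using hw)
      simpa using this

-- the candidate lists of A and B describe the same set of strings
theorem results_iff (common : List String) (core : List Char) (x : String) :
    x ∈ btA common core [] PySem.Set.empty ↔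
      ∃ p ∈ (core.foldl (stepExpand (buildPrefixes common)) [[]]).filter
          (fun p => String.ofList (PySem.Chars.lower p) ∈ PySem.Set.ofList common),
        x = String.ofList p := by
  rw [mem_btA]
  simp only [PySem.Set.empty, List.not_mem_nil, false_or, List.mem_filter,
    PySem.Set.mem_ofList, decide_eq_true_eq]
  constructor
  · rintro ⟨e, he, rfl, hc⟩
    rw [lower_ofList] at hc
    refine ⟨e, ⟨?_, hc⟩, rfl⟩
    have hpre : PySem.Chars.lower ([] ++ e) <+: (PySem.Str.lower (String.ofList e)).toList := by
      rw [List.nil_append, lower_ofList_toList]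
    have hmem := foldl_step_complete common core [] [[]] (by simp) e he
      ⟨PySem.Str.lower (String.ofList e), by rwa [lower_ofList], hpre⟩
    simpa using hmem
  · rintro ⟨p, ⟨hp, hc⟩, rfl⟩
    rcases foldl_step_sound _ core [[]] p hp with ⟨p0, hp0, e, he, rfl⟩
    simp only [List.mem_singleton] at hp0
    subst hp0
    simp only [List.nil_append] at *
    exact ⟨e, he, rfl, by rwa [lower_ofList]⟩

-- the comparison both selections use: the Python tuple key (len(w), w), strictly
def ltLen (a b : String) : Bool :=
  decide (PySem.Str.len a < PySem.Str.len b) ||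
    (!decide (PySem.Str.len b < PySem.Str.len a) && decide (a < b))

theorem ltLen_iff (a b : String) :
    ltLen a b = true ↔
      PySem.Str.len a < PySem.Str.len b ∨
        (¬ PySem.Str.len b < PySem.Str.len a ∧ a < b) := by
  simp [ltLen]

theorem ltLen_irrefl (a : String) : ltLen a a = false := by
  simp [ltLen]

theorem ltLen_trans {a b c : String} (h1 : ltLen a b = true) (h2 : ltLen b c = true) :
    ltLen a c = true := by
  rw [ltLen_iff] at *
  rcases h1 with h1 | ⟨h1, h1'⟩ <;> rcases h2 with h2 | ⟨h2, h2'⟩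
  · exact Or.inl (lt_trans h1 h2)
  · exact Or.inl (lt_of_lt_of_le h1 (not_lt.mp h2))
  · exact Or.inl (lt_of_le_of_lt (not_lt.mp h1) h2)
  · exact Or.inr ⟨by omega, lt_trans h1' h2'⟩

theorem ltLen_neg_total {a b : String} (h : ltLen a b = false) :
    ltLen b a = true ∨ a = b := by
  by_cases hab : a = b
  · exact Or.inr hab
  left
  rw [ltLen_iff]
  have h' : ¬ (PySem.Str.len a < PySem.Str.len b ∨
      (¬ PySem.Str.len b < PySem.Str.len a ∧ a < b)) := by
    rw [← ltLen_iff, h]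
    simp
  push_neg at h'
  obtain ⟨h1, h2⟩ := h'
  by_cases hba : PySem.Str.len b < PySem.Str.len a
  · exact Or.inl hba
  · right
    refine ⟨not_lt.mpr h1, ?_⟩
    have hba' : b ≤ a := h2 (not_lt.mp hba)
    exact lt_of_le_of_ne hba' (fun e => hab e.symm)

-- head of the insertion sort is ltLen-minimal
theorem insertBy_head_min (x : String) (l : List String)
    (hl : ∀ h t, l = h :: t → ∀ y ∈ l, ltLen y h = false) :
    ∀ h t, PySem.List.insertBy ltLen x l = h :: t →
      ∀ y ∈ PySem.List.insertBy ltLen x l, ltLen y h = false := by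
  cases l with
  | nil =>
      intro h t heq y hy
      simp [PySem.List.insertBy] at heq hy
      rw [hy, heq.1, ltLen_irrefl]
  | cons m tl =>
      intro h t heq y hy
      rw [PySem.List.insertBy] at heq hy
      by_cases hxm : ltLen x m = true
      · rw [if_pos hxm] at heq hy
        injection heq with e1 e2
        subst e1; subst e2
        rcases List.mem_cons.mp hy with rfl | hy'
        · exact ltLen_irrefl y
        · have hym : ltLen y m = false := hl m tl rfl y hy'
          by_contra hc
          have hyx : ltLen y x = true := Bool.not_eq_false _ ▸ hc
          have : ltLen y m = true := ltLen_trans hyx hxm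
          rw [this] at hym; exact absurd hym (by simp)
      · rw [if_neg hxm] at heq hy
        have hxm' : ltLen x m = false := by
          cases hv : ltLen x m
          · rfl
          · exact absurd hv hxm
        injection heq with e1 e2
        subst e1; subst e2
        rcases List.mem_cons.mp hy with rfl | hy'
        · exact ltLen_irrefl y
        · rcases (PySem.List.mem_insertBy ltLen x y tl).mp hy' with rfl | hyt
          · exact hxm'
          · exact hl _ tl rfl y (List.mem_cons_of_mem _ hyt)

theorem foldl_insertBy_head_min (xs : List String) :
    ∀ (acc : List String), (∀ h t, acc = h :: t → ∀ y ∈ acc, ltLen y h = false) →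
      ∀ h t, xs.foldl (fun a x => PySem.List.insertBy ltLen x a) acc = h :: t →
        ∀ y ∈ xs.foldl (fun a x => PySem.List.insertBy ltLen x a) acc, ltLen y h = false := by
  induction xs with
  | nil => intro acc hacc h t heq y hy; exact hacc h t heq y hy
  | cons x xs ih =>
      intro acc hacc
      rw [List.foldl_cons]
      exact ih _ (insertBy_head_min x acc hacc)

-- A's sorted2 call IS that insertion-sort fold
theorem sorted2_eq_foldl (xs : List String) :
    PySem.List.sorted2 xs (fun w => PySem.Str.len w) (fun w => w) false =
      xs.foldl (fun a x => PySem.List.insertBy ltLen x a) [] := rfl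

theorem sorted2_head_min (xs : List String) (m : String) (t : List String)
    (h : PySem.List.sorted2 xs (fun w => PySem.Str.len w) (fun w => w) false = m :: t) :
    ∀ y ∈ xs, ltLen y m = false := by
  intro y hy
  have hperm := PySem.List.sorted2_perm xs (fun w => PySem.Str.len w) (fun w => w) false
  have hy' : y ∈ PySem.List.sorted2 xs (fun w => PySem.Str.len w) (fun w => w) false :=
    hperm.mem_iff.mpr hy
  rw [sorted2_eq_foldl] at h hy'
  exact foldl_insertBy_head_min xs [] (by intro h t heq; simp at heq) m t h y hy'

-- B's min2? comparison coincides with ltLen through String.ofList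
theorem ltB_eq (p q : List Char) :
    (decide ((p.length : Int) < (q.length : Int)) ||
      (!decide ((q.length : Int) < (p.length : Int)) &&
        decide (String.ofList p < String.ofList q))) = ltLen (String.ofList p) (String.ofList q) := by
  have hp : PySem.Str.len (String.ofList p) = (p.length : Int) := by
    rw [PySem.Str.len_eq]; simp
  have hq : PySem.Str.len (String.ofList q) = (q.length : Int) := by
    rw [PySem.Str.len_eq]; simp
  rw [ltLen, hp, hq]

-- min2? of a nonempty list returns a member minimal for its comparison
def minStep (acc : Option (List Char)) (x : List Char) : Option (List Char) :=
  match acc with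
  | none => some x
  | some m => if ltLen (String.ofList x) (String.ofList m) = true then some x else some m

theorem min2_eq_foldl_minStep (xs : List (List Char)) :
    PySem.List.min2? xs (fun p => (p.length : Int)) (fun p => String.ofList p) =
      xs.foldl minStep none := by
  unfold PySem.List.min2? minStep
  congr 1
  funext acc x
  cases acc with
  | none => rfl
  | some m => simp only [ltB_eq]

theorem min2_fold_spec (xs : List (List Char)) :
    ∀ (acc m : List Char), xs.foldl minStep (some acc) = some m →
      (m = acc ∨ m ∈ xs) ∧ ltLen (String.ofList acc) (String.ofList m) = false ∧
        ∀ y ∈ xs, ltLen (String.ofList y) (String.ofList m) = false := by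
  induction xs with
  | nil =>
      intro acc m h
      simp at h
      subst h
      exact ⟨Or.inl rfl, ltLen_irrefl _, by simp⟩
  | cons x xs ih =>
      intro acc m h
      rw [List.foldl_cons] at h
      have hstep : minStep (some acc) x =
          if ltLen (String.ofList x) (String.ofList acc) = true then some x else some acc := rfl
      rw [hstep] at h
      by_cases hx : ltLen (String.ofList x) (String.ofList acc) = true
      · rw [if_pos hx] at h
        rcases ih x m h with ⟨hmem, hxm, hall⟩
        refine ⟨?_, ?_, ?_⟩
        · rcases hmem with rfl | hm
          · exact Or.inr (by simp)
          · exact Or.inr (List.mem_cons_of_mem _ hm)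
        · by_contra hc
          have h1 : ltLen (String.ofList acc) (String.ofList m) = true :=
            Bool.not_eq_false _ ▸ hc
          have h2 := ltLen_trans hx h1
          rw [h2] at hxm; exact absurd hxm (by simp)
        · intro y hy
          rcases List.mem_cons.mp hy with rfl | hy'
          · exact hxm
          · exact hall y hy'
      · have hx' : ltLen (String.ofList x) (String.ofList acc) = false := by
          cases hv : ltLen (String.ofList x) (String.ofList acc)
          · rfl
          · exact absurd hv hx
        rw [if_neg hx] at h
        rcases ih acc m h with ⟨hmem, ham, hall⟩
        refine ⟨?_, ham, ?_⟩
        · rcases hmem with rfl | hm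
          · exact Or.inl rfl
          · exact Or.inr (List.mem_cons_of_mem _ hm)
        · intro y hy
          rcases List.mem_cons.mp hy with rfl | hy'
          · by_contra hc
            have h1 : ltLen (String.ofList y) (String.ofList m) = true :=
              Bool.not_eq_false _ ▸ hc
            rcases ltLen_neg_total hx' with h2 | h2
            · have h3 := ltLen_trans h2 h1
              rw [h3] at ham; exact absurd ham (by simp)
            · rw [h2] at h1
              rw [h1] at ham; exact absurd ham (by simp)
          · exact hall y hy'

theorem min2_fold_some (xs : List (List Char)) :
    ∀ (acc : List Char), ∃ m, xs.foldl minStep (some acc) = some m := by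
  induction xs with
  | nil => intro acc; exact ⟨acc, rfl⟩
  | cons x xs ih =>
      intro acc
      rw [List.foldl_cons]
      have hstep : minStep (some acc) x =
          if ltLen (String.ofList x) (String.ofList acc) = true then some x else some acc := rfl
      rw [hstep]
      by_cases hx : ltLen (String.ofList x) (String.ofList acc) = true
      · rw [if_pos hx]; exact ih x
      · rw [if_neg hx]; exact ih acc

theorem min2_spec (xs : List (List Char)) (m : List Char)
    (h : PySem.List.min2? xs (fun p => (p.length : Int)) (fun p => String.ofList p) = some m) :
    m ∈ xs ∧ ∀ y ∈ xs, ltLen (String.ofList y) (String.ofList m) = false := by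
  rw [min2_eq_foldl_minStep] at h
  cases xs with
  | nil => simp at h
  | cons x t =>
      rw [List.foldl_cons] at h
      have hstep : minStep none x = some x := rfl
      rw [hstep] at h
      rcases min2_fold_spec t x m h with ⟨hmem, hxm, hall⟩
      refine ⟨?_, ?_⟩
      · rcases hmem with rfl | hm
        · simp
        · exact List.mem_cons_of_mem _ hm
      · intro y hy
        rcases List.mem_cons.mp hy with rfl | hy'
        · exact hxm
        · exact hall y hy'

theorem min2_some_of_ne_nil (xs : List (List Char)) (hne : xs ≠ []) :
    ∃ m, PySem.List.min2? xs (fun p => (p.length : Int)) (fun p => String.ofList p) = some m := by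
  rw [min2_eq_foldl_minStep]
  cases xs with
  | nil => exact absurd rfl hne
  | cons x t =>
      rw [List.foldl_cons]
      exact min2_fold_some t x

-- ===== VERDICT (by name: the statement is the Claim_ definition above) =====
theorem normalize_leet_spec : Claim_equal_normalize_leet := by
  intro word common _
  unfold Spec_normalize_leet normalize_leet normalize_leet_alt
  by_cases ha : PySem.Str.strIsalpha word = true
  · rw [if_pos ha, if_pos ha]
  · simp only [ha, Bool.false_eq_true, if_false]
    set has2 := PySem.Str.endswith word "2" with hh2
    set core := if has2 then PySem.Str.slice word none (some (-1)) else word with hcore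
    set results := btA common core.toList [] PySem.Set.empty with hres
    set matchesL := (core.toList.foldl (stepExpand (buildPrefixes common)) [[]]).filter
        (fun p => String.ofList (PySem.Chars.lower p) ∈ PySem.Set.ofList common) with hmat
    have hiff : ∀ x, x ∈ results ↔ ∃ p ∈ matchesL, x = String.ofList p := fun x =>
      results_iff common core.toList x
    by_cases hre : results = []
    · have hme : matchesL = [] := by
        rcases hm : matchesL with _ | ⟨p, t⟩
        · rfl
        · exfalso
          have : String.ofList p ∈ results := (hiff _).mpr ⟨p, by rw [hm]; simp, rfl⟩
          rw [hre] at this; simp at this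
      rw [if_pos hre, if_pos hme]
    · have hme : matchesL ≠ [] := by
        intro hm
        rcases hr : results with _ | ⟨x, t⟩
        · exact hre hr
        · have : x ∈ results := by rw [hr]; simp
          rcases (hiff x).mp this with ⟨p, hp, _⟩
          rw [hm] at hp; simp at hp
      rw [if_neg hre, if_neg hme]
      rcases hs : PySem.List.sorted2 results (fun w => PySem.Str.len w) (fun w => w) false with
        _ | ⟨best1, t1⟩
      · exfalso
        have hperm := PySem.List.sorted2_perm results (fun w => PySem.Str.len w) (fun w => w) false
        rw [hs] at hperm
        exact hre hperm.symm.eq_nil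
      · rcases min2_some_of_ne_nil matchesL hme with ⟨best2, hm2⟩
        rw [hm2]
        have hb1mem : best1 ∈ results := by
          have : best1 ∈ PySem.List.sorted2 results (fun w => PySem.Str.len w) (fun w => w) false := by
            rw [hs]; simp
          exact (PySem.List.sorted2_perm results _ _ false).mem_iff.mp this
        have hb1min : ∀ y ∈ results, ltLen y best1 = false :=
          sorted2_head_min results best1 t1 hs
        rcases min2_spec matchesL best2 hm2 with ⟨hb2mem, hb2min⟩
        have heq : best1 = String.ofList best2 := by
          have h1 : ltLen best1 (String.ofList best2) = false := by
            rcases (hiff best1).mp hb1mem with ⟨p, hp, rfl⟩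
            exact hb2min p hp
          have h2 : ltLen (String.ofList best2) best1 = false :=
            hb1min _ ((hiff _).mpr ⟨best2, hb2mem, rfl⟩)
          rcases ltLen_neg_total h2 with hlt | he
          · rw [hlt] at h1; exact absurd h1 (by simp)
          · exact he.symm
        rw [heq]
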